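-- pv_equiv track=rewrite | github.com/sfox38/harvest | custom_components/harvest/entity_definition.py | get_blocked_data_keys
-- ===== SOURCE A (Python) =====
-- _ATTR_TO_FEATURE: dict[str, str] = {
--     "color_temp_kelvin": "color_temp",
--     "min_mireds": "color_temp",
--     "max_mireds": "color_temp",
--     "min_color_temp_kelvin": "color_temp",
--     "max_color_temp_kelvin": "color_temp",
--     "hs_color": "rgb_color",
--     "xy_color": "rgb_color",
--     "effect_list": "effect",
--     "percentage": "set_speed",
--     "percentage_step": "set_speed",
--     "oscillating": "oscillate",
--     "current_position": "set_position",
--     "current_tilt_position": "set_tilt_position",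
--     "temperature": "target_temperature",
--     "volume_level": "volume_set",
-- }
--
-- _DATA_KEY_ATTR_NAME: dict[str, str] = {
--     "brightness_pct": "brightness",
--     "color_temp_kelvin": "color_temp",
--     "rgbw_color": "rgb_color",
--     "rgbww_color": "rgb_color",
--     "hs_color": "rgb_color",
--     "xy_color": "rgb_color",
--     "target_temp_low": "temperature",
--     "target_temp_high": "temperature",
--     "position": "current_position",
--     "tilt_position": "current_tilt_position",
-- }
--
-- def _features_to_suppress(exclude_attributes: list[str]) -> set[str]:
--     """Compute the set of feature names to remove from supported_features.
--
--     Direct match: attribute name = feature name (covers most cases).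
--     Reverse lookup: attribute maps to a differently-named feature via _ATTR_TO_FEATURE.
--     """
--     result: set[str] = set()
--     for attr in exclude_attributes:
--         result.add(attr)
--         mapped = _ATTR_TO_FEATURE.get(attr)
--         if mapped:
--             result.add(mapped)
--     return result
--
-- def get_blocked_data_keys(exclude_attributes: list[str]) -> set[str]:
--     """Return the set of command data keys that should be stripped.
--
--     Direct match: data key name in excluded attributes.
--     Forward lookup: data key maps to an excluded attribute via _DATA_KEY_ATTR_NAME.
--     Reverse lookup: excluded attribute maps to a feature, and data keys sharing
--     that feature name are also blocked.
--     """
--     exclude_set = set(exclude_attributes)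
--     blocked: set[str] = set(exclude_attributes)
--     suppressed = _features_to_suppress(exclude_attributes)
--     for data_key, attr in _DATA_KEY_ATTR_NAME.items():
--         if attr in exclude_set or attr in suppressed:
--             blocked.add(data_key)
--     blocked |= suppressed
--     return blocked
-- ===== SOURCE B (Python) =====
-- _ATTR_TO_FEATURE: dict[str, str] = {
--     "color_temp_kelvin": "color_temp",
--     "min_mireds": "color_temp",
--     "max_mireds": "color_temp",
--     "min_color_temp_kelvin": "color_temp",
--     "max_color_temp_kelvin": "color_temp",
--     "hs_color": "rgb_color",
--     "xy_color": "rgb_color",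
--     "effect_list": "effect",
--     "percentage": "set_speed",
--     "percentage_step": "set_speed",
--     "oscillating": "oscillate",
--     "current_position": "set_position",
--     "current_tilt_position": "set_tilt_position",
--     "temperature": "target_temperature",
--     "volume_level": "volume_set",
-- }
--
-- _DATA_KEY_ATTR_NAME: dict[str, str] = {
--     "brightness_pct": "brightness",
--     "color_temp_kelvin": "color_temp",
--     "rgbw_color": "rgb_color",
--     "rgbww_color": "rgb_color",
--     "hs_color": "rgb_color",
--     "xy_color": "rgb_color",
--     "target_temp_low": "temperature",
--     "target_temp_high": "temperature",
--     "position": "current_position",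
--     "tilt_position": "current_tilt_position",
-- }
--
-- # Static reverse-trigger table, built once: for each data key, the set of
-- # attribute names whose exclusion blocks it — its own attr plus every
-- # attribute that _ATTR_TO_FEATURE maps onto that attr.  At runtime no
-- # suppressed/feature expansion of the excludes is needed for the data-key
-- # decision: a key is blocked iff its trigger set meets the raw exclude set.
-- _TRIGGERS: dict[str, set] = {
--     dk: {attr} | {a for a, f in _ATTR_TO_FEATURE.items() if f == attr}
--     for dk, attr in _DATA_KEY_ATTR_NAME.items()
-- }
--
--
-- def get_blocked_data_keys(exclude_attributes: list[str]) -> set: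
--     ex = set(exclude_attributes)
--     return set(
--         exclude_attributes
--         + [dk for dk, trig in _TRIGGERS.items() if not ex.isdisjoint(trig)]
--         + [_ATTR_TO_FEATURE[a] for a in exclude_attributes if a in _ATTR_TO_FEATURE]
--     )
-- ===== Notes on version B (the rewrite author's own statement) =====
-- stated objective: alternative
-- what changed: A expands the excludes at runtime into a 'suppressed' feature set and scans the data-key table testing each entry's attr against two sets; B instead precomputes a static reverse-trigger table (data key -> the attribute names whose exclusion blocks it, by inverting _ATTR_TO_FEATURE onto each entry) and decides each data key by a single intersection test of its trigger set with the raw exclude set, assembling the result as one set() over a concatenation of comprehensions with no suppressed set and no incremental mutation.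
import Mathlib
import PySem

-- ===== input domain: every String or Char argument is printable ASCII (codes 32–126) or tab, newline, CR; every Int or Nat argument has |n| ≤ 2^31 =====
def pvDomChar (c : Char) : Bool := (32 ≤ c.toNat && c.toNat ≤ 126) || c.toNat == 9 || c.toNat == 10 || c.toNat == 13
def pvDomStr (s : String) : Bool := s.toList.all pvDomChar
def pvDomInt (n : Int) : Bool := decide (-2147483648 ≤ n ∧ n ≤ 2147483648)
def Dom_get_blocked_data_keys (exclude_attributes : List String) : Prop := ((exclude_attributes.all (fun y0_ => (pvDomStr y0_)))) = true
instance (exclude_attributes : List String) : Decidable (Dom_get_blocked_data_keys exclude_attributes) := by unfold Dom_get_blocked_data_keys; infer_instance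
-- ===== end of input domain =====

-- B replaces A's runtime expansion of the excludes into a 'suppressed' feature set (and the
-- scan of the data-key table against it) by a static reverse-trigger table — for each data key,
-- the attribute names whose exclusion blocks it — tested directly against the raw exclude set
-- (alternative decomposition, same cost).

-- ===== PORT A =====
def pvAttrToFeature : PySem.Dict String String := PySem.Dict.ofList
  [("color_temp_kelvin", "color_temp"), ("min_mireds", "color_temp"), ("max_mireds", "color_temp"),
   ("min_color_temp_kelvin", "color_temp"), ("max_color_temp_kelvin", "color_temp"),
   ("hs_color", "rgb_color"), ("xy_color", "rgb_color"), ("effect_list", "effect"),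
   ("percentage", "set_speed"), ("percentage_step", "set_speed"), ("oscillating", "oscillate"),
   ("current_position", "set_position"), ("current_tilt_position", "set_tilt_position"),
   ("temperature", "target_temperature"), ("volume_level", "volume_set")]

def pvDataKeyAttrName : PySem.Dict String String := PySem.Dict.ofList
  [("brightness_pct", "brightness"), ("color_temp_kelvin", "color_temp"),
   ("rgbw_color", "rgb_color"), ("rgbww_color", "rgb_color"), ("hs_color", "rgb_color"),
   ("xy_color", "rgb_color"), ("target_temp_low", "temperature"), ("target_temp_high", "temperature"),
   ("position", "current_position"), ("tilt_position", "current_tilt_position")]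

def pvFeaturesToSuppress (exclude_attributes : List String) : PySem.Set String :=
  exclude_attributes.foldl (fun result attr =>
    let result := PySem.Set.add result attr
    match PySem.Dict.get? pvAttrToFeature attr with
    | some mapped => if mapped ≠ "" then PySem.Set.add result mapped else result
    | none => result) PySem.Set.empty

def get_blocked_data_keys (exclude_attributes : List String) : List String :=
  let exclude_set : PySem.Set String := PySem.Set.ofList exclude_attributes
  let blocked : PySem.Set String := PySem.Set.ofList exclude_attributes
  let suppressed := pvFeaturesToSuppress exclude_attributes
  let blocked := (PySem.Dict.items pvDataKeyAttrName).foldl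
    (fun blocked p =>
      if PySem.Set.contains exclude_set p.2 || PySem.Set.contains suppressed p.2
      then PySem.Set.add blocked p.1 else blocked) blocked
  PySem.Set.union blocked suppressed

-- ===== PORT B =====
-- value of Source B's _TRIGGERS comprehension for one entry: {attr} | {a for a, f in items if f == attr}
def pvTrigSet (attr : String) : PySem.Set String :=
  PySem.Set.union (PySem.Set.ofList [attr])
    (PySem.Set.ofList (((PySem.Dict.items pvAttrToFeature).filter (fun q => q.2 == attr)).map Prod.fst))

-- static table built once at module level: data key -> set of attribute names that trigger it
def pvTriggers : PySem.Dict String (PySem.Set String) :=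
  PySem.Dict.ofList ((PySem.Dict.items pvDataKeyAttrName).map (fun p => (p.1, pvTrigSet p.2)))

def get_blocked_data_keys_alt (exclude_attributes : List String) : List String :=
  let ex : PySem.Set String := PySem.Set.ofList exclude_attributes
  PySem.Set.ofList
    (exclude_attributes
      ++ ((PySem.Dict.items pvTriggers).filter
            (fun p => !(PySem.Set.isdisjoint ex p.2))).map Prod.fst
      ++ exclude_attributes.filterMap (fun a => PySem.Dict.get? pvAttrToFeature a))

-- ===== PRECONDITION & SPEC =====
def Spec_get_blocked_data_keys (exclude_attributes : List String) (out : List String) : Prop := out = get_blocked_data_keys_alt exclude_attributes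
instance (exclude_attributes : List String) (out : List String) : Decidable (Spec_get_blocked_data_keys exclude_attributes out) := by unfold Spec_get_blocked_data_keys; infer_instance

-- ===== CLAIM (what is proved, stated in full; the proofs are below) =====
def Claim_equal_get_blocked_data_keys : Prop := ∀ (exclude_attributes : List String), Dom_get_blocked_data_keys exclude_attributes → Spec_get_blocked_data_keys exclude_attributes (get_blocked_data_keys exclude_attributes)

-- ===== LEMMAS AND PROOFS =====

-- every value in _ATTR_TO_FEATURE is a non-empty string
theorem pv_values_nonempty : ∀ p ∈ (PySem.Dict.items pvAttrToFeature), p.2 ≠ "" := by decide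

-- A's per-attribute suppress step equals the flattened pair (a, getD a a)
theorem pv_step_eq (r : PySem.Set String) (a : String) :
    (let r' := PySem.Set.add r a
     match PySem.Dict.get? pvAttrToFeature a with
     | some mapped => if mapped ≠ "" then PySem.Set.add r' mapped else r'
     | none => r')
    = PySem.Set.add (PySem.Set.add r a) (PySem.Dict.getD pvAttrToFeature a a) := by
  cases h : PySem.Dict.get? pvAttrToFeature a with
  | none =>
      simp only [PySem.Dict.getD_eq_get?_getD, h, Option.getD_none]
      exact (PySem.Set.add_of_mem (by simp [PySem.Set.mem_add])).symm
  | some m =>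
      have hm : m ≠ "" := pv_values_nonempty (a, m) (PySem.Dict.mem_items_of_get?_eq_some pvAttrToFeature h)
      simp only [PySem.Dict.getD_eq_get?_getD, h, Option.getD_some, if_pos hm]

theorem pv_fold_eq (xs : List String) (s : PySem.Set String) :
    xs.foldl (fun result attr =>
      let result := PySem.Set.add result attr
      match PySem.Dict.get? pvAttrToFeature attr with
      | some mapped => if mapped ≠ "" then PySem.Set.add result mapped else result
      | none => result) s
    = (xs.flatMap (fun a => [a, PySem.Dict.getD pvAttrToFeature a a])).foldl PySem.Set.add s := by
  induction xs generalizing s with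
  | nil => rfl
  | cons a xs ih =>
      simp only [List.flatMap_cons, List.foldl_cons, List.foldl_append, List.foldl_cons]
      rw [pv_step_eq]
      exact ih _

theorem pv_supp_eq (xs : List String) :
    pvFeaturesToSuppress xs
      = PySem.Set.ofList (xs.flatMap (fun a => [a, PySem.Dict.getD pvAttrToFeature a a])) := by
  rw [PySem.Set.ofList_eq_foldl]
  exact pv_fold_eq xs PySem.Set.empty

-- membership in one trigger set
theorem pv_mem_trigSet (v a : String) :
    a ∈ pvTrigSet v ↔ a = v ∨ PySem.Dict.get? pvAttrToFeature a = some v := by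
  unfold pvTrigSet
  simp only [PySem.Set.mem_union, PySem.Set.mem_ofList, List.mem_singleton, List.mem_map,
    List.mem_filter]
  constructor
  · rintro (rfl | ⟨⟨k, w⟩, ⟨hmem, hw⟩, rfl⟩)
    · exact Or.inl rfl
    · right
      have hwv : w = v := by simpa using hw
      subst hwv
      exact PySem.Dict.get?_of_mem_items pvAttrToFeature hmem (by decide)
  · rintro (rfl | h)
    · exact Or.inl rfl
    · exact Or.inr ⟨(a, v), ⟨PySem.Dict.mem_items_of_get?_eq_some pvAttrToFeature h, by simp⟩, rfl⟩

-- A's membership test (attr in exclude_set or attr in suppressed) equals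
-- B's trigger-set test (exclude set not disjoint from the trigger set)
theorem pv_cond_eq (xs : List String) (v : String) :
    (PySem.Set.contains (PySem.Set.ofList xs) v
      || PySem.Set.contains (PySem.Set.ofList (xs.flatMap (fun a => [a, PySem.Dict.getD pvAttrToFeature a a]))) v)
    = !(PySem.Set.isdisjoint (PySem.Set.ofList xs) (pvTrigSet v)) := by
  have hR : (!(PySem.Set.isdisjoint (PySem.Set.ofList xs) (pvTrigSet v))) = true
      ↔ ∃ a ∈ xs, a ∈ pvTrigSet v := by
    constructor
    · intro h
      by_contra hc
      push_neg at hc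
      have hd : PySem.Set.isdisjoint (PySem.Set.ofList xs) (pvTrigSet v) = true :=
        (PySem.Set.isdisjoint_iff _ _).mpr
          (fun x hx => hc x ((PySem.Set.mem_ofList _ _).mp hx))
      rw [hd] at h
      exact Bool.false_ne_true (by simpa using h)
    · rintro ⟨a, ha, hm⟩
      rcases Bool.eq_false_or_eq_true (PySem.Set.isdisjoint (PySem.Set.ofList xs) (pvTrigSet v)) with hd | hd
      · exact absurd hm (((PySem.Set.isdisjoint_iff _ _).mp hd) a ((PySem.Set.mem_ofList _ _).mpr ha))
      · rw [hd]
        rfl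
  have hL : (PySem.Set.contains (PySem.Set.ofList xs) v
      || PySem.Set.contains (PySem.Set.ofList (xs.flatMap (fun a => [a, PySem.Dict.getD pvAttrToFeature a a]))) v) = true
      ↔ (v ∈ xs ∨ ∃ a ∈ xs, v = a ∨ v = PySem.Dict.getD pvAttrToFeature a a) := by
    simp [Bool.or_eq_true, PySem.Set.contains_iff, PySem.Set.mem_ofList, List.mem_flatMap]
  rw [Bool.eq_iff_iff, hL, hR]
  constructor
  · rintro (hv | ⟨a, ha, hva | hvd⟩)
    · exact ⟨v, hv, (pv_mem_trigSet v v).mpr (Or.inl rfl)⟩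
    · exact ⟨a, ha, (pv_mem_trigSet v a).mpr (Or.inl hva.symm)⟩
    · refine ⟨a, ha, (pv_mem_trigSet v a).mpr ?_⟩
      cases hg : PySem.Dict.get? pvAttrToFeature a with
      | none =>
          left
          rw [PySem.Dict.getD_eq_get?_getD, hg] at hvd
          exact hvd.symm
      | some m =>
          right
          rw [PySem.Dict.getD_eq_get?_getD, hg] at hvd
          simp only [Option.getD_some] at hvd
          rw [hvd]
  · rintro ⟨a, ha, hm⟩
    rcases (pv_mem_trigSet v a).mp hm with rfl | hg
    · exact Or.inl ha
    · refine Or.inr ⟨a, ha, Or.inr ?_⟩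
      rw [PySem.Dict.getD_eq_get?_getD, hg]
      rfl

-- B's filter-then-collect over a pair list is A's conditional-add fold
theorem pv_update_filter_fst {β : Type} (l : List (String × β)) (c : String × β → Bool)
    (s : PySem.Set String) :
    PySem.Set.update s ((l.filter c).map Prod.fst)
      = l.foldl (fun b p => if c p then PySem.Set.add b p.1 else b) s := by
  induction l generalizing s with
  | nil => rfl
  | cons p t ih =>
      by_cases hc : c p
      · simp only [List.filter_cons, hc, if_pos, List.map_cons, PySem.Set.update_cons,
          List.foldl_cons]
        exact ih _
      · simp only [List.filter_cons, hc, List.foldl_cons, Bool.false_eq_true, if_false]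
        exact ih _

-- membership survives A's conditional-add fold
theorem pv_mem_foldl_addIf {β : Type} (l : List (String × β)) (c : String × β → Bool)
    (s : PySem.Set String) (y : String) (hy : y ∈ s) :
    y ∈ l.foldl (fun b p => if c p then PySem.Set.add b p.1 else b) s := by
  induction l generalizing s with
  | nil => exact hy
  | cons p t ih =>
      simp only [List.foldl_cons]
      apply ih
      by_cases hc : c p
      · simp only [hc, if_pos, PySem.Set.mem_add]
        exact Or.inl hy
      · simpa [hc] using hy

-- once every excluded attribute is already in the set, A's (attr, feature) pairs and
-- B's mapped-features-only list update it identically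
theorem pv_tail_eq (xs : List String) (s : PySem.Set String) (h : ∀ a ∈ xs, a ∈ s) :
    PySem.Set.update s (xs.flatMap (fun a => [a, PySem.Dict.getD pvAttrToFeature a a]))
      = PySem.Set.update s (xs.filterMap (fun a => PySem.Dict.get? pvAttrToFeature a)) := by
  induction xs generalizing s with
  | nil => rfl
  | cons a t ih =>
      have ha : a ∈ s := h a (List.mem_cons_self ..)
      have ht : ∀ x ∈ t, x ∈ s := fun x hx => h x (List.mem_cons_of_mem _ hx)
      rw [List.flatMap_cons, List.filterMap_cons]
      cases hg : PySem.Dict.get? pvAttrToFeature a with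
      | none =>
          have hd : PySem.Dict.getD pvAttrToFeature a a = a := by
            rw [PySem.Dict.getD_eq_get?_getD, hg]; rfl
          rw [hd, List.cons_append, List.cons_append, List.nil_append,
            PySem.Set.update_cons, PySem.Set.update_cons,
            PySem.Set.add_of_mem ha, PySem.Set.add_of_mem ha]
          exact ih s ht
      | some m =>
          have hd : PySem.Dict.getD pvAttrToFeature a a = m := by
            rw [PySem.Dict.getD_eq_get?_getD, hg]; rfl
          rw [hd, List.cons_append, List.cons_append, List.nil_append,
            PySem.Set.update_cons, PySem.Set.update_cons,
            PySem.Set.add_of_mem ha, PySem.Set.update_cons]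
          exact ih (PySem.Set.add s m)
            (fun x hx => by simp only [PySem.Set.mem_add]; exact Or.inl (ht x hx))

theorem pv_union_eq_update (s t : PySem.Set String) : PySem.Set.union s t = PySem.Set.update s t := rfl

theorem pv_update_ofList (s : PySem.Set String) (l : List String) :
    PySem.Set.update s (PySem.Set.ofList l) = PySem.Set.update s l := by
  rw [PySem.Set.update_eq_append_filter, PySem.Set.update_eq_append_filter, PySem.Set.ofList_ofList]

-- B's trigger table, entrywise over A's data-key table
theorem pv_triggers_items : PySem.Dict.items pvTriggers
    = (PySem.Dict.items pvDataKeyAttrName).map (fun p => (p.1, pvTrigSet p.2)) := by decide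

-- ===== VERDICT (by name: the statement is the Claim_ definition above) =====
theorem get_blocked_data_keys_spec : Claim_equal_get_blocked_data_keys := by
  intro xs _
  unfold Spec_get_blocked_data_keys get_blocked_data_keys get_blocked_data_keys_alt
  dsimp only
  rw [pv_supp_eq]
  rw [PySem.Set.ofList_append, PySem.Set.ofList_append, pv_update_filter_fst,
    pv_triggers_items, List.foldl_map]
  have hfun : (fun (b : PySem.Set String) (p : String × String) =>
      if !(PySem.Set.isdisjoint (PySem.Set.ofList xs) (pvTrigSet p.2))
      then PySem.Set.add b p.1 else b)
    = (fun (b : PySem.Set String) (p : String × String) =>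
      if PySem.Set.contains (PySem.Set.ofList xs) p.2
         || PySem.Set.contains (PySem.Set.ofList (xs.flatMap (fun a => [a, PySem.Dict.getD pvAttrToFeature a a]))) p.2
      then PySem.Set.add b p.1 else b) := by
    funext b p
    rw [pv_cond_eq]
  rw [hfun, pv_union_eq_update, pv_update_ofList]
  exact pv_tail_eq xs _
    (fun a ha => pv_mem_foldl_addIf _ _ _ _ (by simpa [PySem.Set.mem_ofList] using ha))
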